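-- pv_equiv track=rewrite | github.com/trakt/script.trakt | tagging.py | sanitizeTraktParams
-- ===== SOURCE A (Python) =====
-- import copy
--
-- def sanitizeTraktParams(data):
--     newData = copy.deepcopy(data)
--     for item in newData:
--         if 'imdb_id' in item and not item['imdb_id']:
--             del(item['imdb_id'])
--         if 'tmdb_id' in item and not item['tmdb_id']:
--             del(item['tmdb_id'])
--         if 'tvdb_id' in item and not item['tvdb_id']:
--             del(item['tvdb_id'])
--         if 'tvshowid' in item:
--             del(item['tvshowid'])
--         if 'movieid' in item:
--             del(item['movieid'])
--         if 'tag' in item: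
--             del(item['tag'])
--     return newData
-- ===== SOURCE B (Python) =====
-- import copy
--
-- _DROP = {'tvshowid', 'movieid', 'tag'}
-- _COND = {'imdb_id', 'tmdb_id', 'tvdb_id'}
--
-- def sanitizeTraktParams(data):
--     return [{k: copy.deepcopy(v) for k, v in item.items()
--              if k not in _DROP and not (k in _COND and not v)}
--             for item in data]
-- ===== Notes on version B (the rewrite author's own statement) =====
-- stated objective: simpler
-- what changed: Instead of deep-copying each dict and then deleting named keys with six membership/del statements, B builds each cleaned dict in one comprehension over the item's keys, keeping only keys outside a drop-set and not falsy-valued keys of a conditional-set; Pre_ excludes items with duplicate keys, which cannot arise from a Python dict and whose assoc-list behaviour is purely representational.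
import Mathlib
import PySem

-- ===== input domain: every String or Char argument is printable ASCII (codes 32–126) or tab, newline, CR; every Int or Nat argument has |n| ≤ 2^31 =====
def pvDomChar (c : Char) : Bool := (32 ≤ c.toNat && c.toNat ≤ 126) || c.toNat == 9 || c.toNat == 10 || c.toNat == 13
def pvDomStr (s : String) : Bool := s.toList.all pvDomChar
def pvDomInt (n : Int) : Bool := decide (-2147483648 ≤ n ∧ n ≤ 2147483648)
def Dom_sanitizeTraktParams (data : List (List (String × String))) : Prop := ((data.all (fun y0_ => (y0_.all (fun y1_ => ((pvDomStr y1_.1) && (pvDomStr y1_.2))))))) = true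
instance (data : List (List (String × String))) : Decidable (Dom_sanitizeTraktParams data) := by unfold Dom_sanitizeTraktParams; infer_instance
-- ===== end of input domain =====

-- B replaces A's deepcopy-then-delete-named-keys loop by a single filtering
-- comprehension over each item's own keys (objective: simpler).

-- ===== PORT A =====
-- `if k in item and not item[k]: del item[k]`  (string values: falsy = "")
def pvDelFalsy (d : PySem.Dict String String) (k : String) : PySem.Dict String String :=
  match d.get? k with
  | some v => if v == "" then d.erase k else d
  | none => d

-- `if k in item: del item[k]`
def pvDelKey (d : PySem.Dict String String) (k : String) : PySem.Dict String String :=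
  if d.contains k then d.erase k else d

def sanitizeTraktParams (data : List (List (String × String))) : List (List (String × String)) :=
  -- deepcopy is the identity on immutable string values; each Python dict is
  -- PySem.Dict at the boundary (mk on entry, items on return)
  data.map (fun item =>
    (pvDelKey (pvDelKey (pvDelKey
      (pvDelFalsy (pvDelFalsy (pvDelFalsy (PySem.Dict.mk item) "imdb_id") "tmdb_id") "tvdb_id")
      "tvshowid") "movieid") "tag").items)

-- ===== PORT B =====
def pvDropSet : List String := ["tvshowid", "movieid", "tag"]
def pvCondSet : List String := ["imdb_id", "tmdb_id", "tvdb_id"]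

def sanitizeTraktParams_alt (data : List (List (String × String))) : List (List (String × String)) :=
  data.map (fun item =>
    item.filter (fun p => !(pvDropSet.contains p.1) && !(pvCondSet.contains p.1 && p.2 == "")))

-- ===== PRECONDITION & SPEC =====
-- Pre_ excludes items whose association list carries a duplicate key: such a list does not
-- represent any Python dict (dict construction collapses duplicates), so the assoc-list
-- behaviour there is purely representational.
def Pre_sanitizeTraktParams (data : List (List (String × String))) : Prop :=
  ∀ item ∈ data, (item.map Prod.fst).Nodup

instance (data : List (List (String × String))) : Decidable (Pre_sanitizeTraktParams data) := by
  unfold Pre_sanitizeTraktParams; infer_instance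

def pvWitness_sanitizeTraktParams : (List (List (String × String))) :=
  [[("imdb_id", "tt123"), ("tmdb_id", ""), ("tag", "seen"), ("title", "X")]]

def Spec_sanitizeTraktParams (data : List (List (String × String))) (out : List (List (String × String))) : Prop := out = sanitizeTraktParams_alt data
instance (data : List (List (String × String))) (out : List (List (String × String))) : Decidable (Spec_sanitizeTraktParams data out) := by unfold Spec_sanitizeTraktParams; infer_instance

-- ===== CLAIM (what is proved, stated in full; the proofs are below) =====
def Claim_equal_sanitizeTraktParams : Prop := ∀ (data : List (List (String × String))), Dom_sanitizeTraktParams data → Pre_sanitizeTraktParams data → Spec_sanitizeTraktParams data (sanitizeTraktParams data)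

-- ===== LEMMAS AND PROOFS =====

-- first-match lookup is unchanged by a filter that keeps every pair with key k
theorem pv_get?_mk_filter (l : List (String × String)) (g : String × String → Bool) (k : String)
    (h : ∀ p ∈ l, p.1 = k → g p = true) :
    (PySem.Dict.mk (l.filter g)).get? k = (PySem.Dict.mk l).get? k := by
  induction l with
  | nil => rfl
  | cons a l ih =>
    obtain ⟨ak, av⟩ := a
    by_cases hk : ak = k
    · subst hk
      have := h (ak, av) (by simp) rfl
      simp [this, PySem.Dict.get?_mk_cons]
    · have ih' := ih (fun p hp => h p (by simp [hp]))
      by_cases hg : g (ak, av) = true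
      · simp [hg, PySem.Dict.get?_mk_cons, hk, ih']
      · simp only [Bool.not_eq_true] at hg
        simp [hg, PySem.Dict.get?_mk_cons, hk, ih']

theorem pv_erase_items (d : PySem.Dict String String) (k : String) :
    (d.erase k).items = d.items.filter (fun p => !(p.1 == k)) := rfl

theorem pv_delFalsy_items (d : PySem.Dict String String) (k : String) :
    (pvDelFalsy d k).items =
      d.items.filter (fun p => !(p.1 == k && d.get? k == some "")) := by
  unfold pvDelFalsy
  cases hg : d.get? k with
  | none => simp
  | some v =>
    by_cases hv : v = ""
    · simp [hv, pv_erase_items]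
    · have hbeq : (v == "") = false := by simpa using hv
      simp only [hbeq, Bool.false_eq_true, if_false]
      symm
      apply List.filter_eq_self.mpr
      intro p _
      simp [hv]

theorem pv_delKey_items (d : PySem.Dict String String) (k : String) :
    (pvDelKey d k).items = d.items.filter (fun p => !(p.1 == k)) := by
  unfold pvDelKey
  by_cases hc : d.contains k = true
  · simp [hc, pv_erase_items]
  · simp only [Bool.not_eq_true] at hc
    have hk : ∀ p ∈ d.items, ¬ p.1 = k := by
      intro p hp hpk
      have : k ∈ d.keys := by
        have : p.1 ∈ d.items.map Prod.fst := List.mem_map_of_mem hp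
        simpa [PySem.Dict.keys, hpk] using this
      rw [← PySem.Dict.contains_iff_mem_keys] at this
      simp [hc] at this
    rw [if_neg (by simp [hc])]
    symm
    apply List.filter_eq_self.mpr
    intro p hp
    simp [hk p hp]

-- any Dict is mk of its items
theorem pv_dict_eta (d : PySem.Dict String String) : PySem.Dict.mk d.items = d := rfl

-- per-item equality, under Nodup keys
theorem pv_item_eq (item : List (String × String)) (hnd : (item.map Prod.fst).Nodup) :
    (pvDelKey (pvDelKey (pvDelKey
      (pvDelFalsy (pvDelFalsy (pvDelFalsy (PySem.Dict.mk item) "imdb_id") "tmdb_id") "tvdb_id")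
      "tvshowid") "movieid") "tag").items =
    item.filter (fun p => !(pvDropSet.contains p.1) && !(pvCondSet.contains p.1 && p.2 == "")) := by
  set d0 := PySem.Dict.mk item with hd0
  -- lookups of the three conditional keys are unchanged along the pipeline
  have stable : ∀ (d : PySem.Dict String String) (k k' : String), k ≠ k' →
      (PySem.Dict.mk (d.items.filter (fun p => !(p.1 == k' && d.get? k' == some "")))).get? k = (PySem.Dict.mk d.items).get? k := by
    intro d k k' hne
    apply pv_get?_mk_filter
    intro p _ hp
    simp [hp, hne]
  have h1 := pv_delFalsy_items d0 "imdb_id"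
  have g1 : (pvDelFalsy d0 "imdb_id").get? "tmdb_id" = d0.get? "tmdb_id" := by
    conv_lhs => rw [← pv_dict_eta (pvDelFalsy d0 "imdb_id")]
    rw [h1]; exact stable d0 "tmdb_id" "imdb_id" (by decide)
  have g1' : (pvDelFalsy d0 "imdb_id").get? "tvdb_id" = d0.get? "tvdb_id" := by
    conv_lhs => rw [← pv_dict_eta (pvDelFalsy d0 "imdb_id")]
    rw [h1]; exact stable d0 "tvdb_id" "imdb_id" (by decide)
  have h2 := pv_delFalsy_items (pvDelFalsy d0 "imdb_id") "tmdb_id"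
  have g2 : (pvDelFalsy (pvDelFalsy d0 "imdb_id") "tmdb_id").get? "tvdb_id" = d0.get? "tvdb_id" := by
    conv_lhs => rw [← pv_dict_eta (pvDelFalsy (pvDelFalsy d0 "imdb_id") "tmdb_id")]
    rw [h2]
    rw [← g1']
    conv_rhs => rw [← pv_dict_eta (pvDelFalsy d0 "imdb_id")]
    exact stable _ "tvdb_id" "tmdb_id" (by decide)
  have h3 := pv_delFalsy_items (pvDelFalsy (pvDelFalsy d0 "imdb_id") "tmdb_id") "tvdb_id"
  have h4 := pv_delKey_items (pvDelFalsy (pvDelFalsy (pvDelFalsy d0 "imdb_id") "tmdb_id") "tvdb_id") "tvshowid"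
  have h5 := pv_delKey_items (pvDelKey (pvDelFalsy (pvDelFalsy (pvDelFalsy d0 "imdb_id") "tmdb_id") "tvdb_id") "tvshowid") "movieid"
  have h6 := pv_delKey_items (pvDelKey (pvDelKey (pvDelFalsy (pvDelFalsy (pvDelFalsy d0 "imdb_id") "tmdb_id") "tvdb_id") "tvshowid") "movieid") "tag"
  rw [h6, h5, h4, h3, h2, h1, g1, g2]
  have hitems : d0.items = item := rfl
  rw [hitems]
  simp only [List.filter_filter]
  apply List.filter_congr
  intro p hp
  have hv : d0.get? p.1 = some p.2 := by
    apply PySem.Dict.get?_of_mem_items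
    · simpa [hitems] using hp
    · simpa [PySem.Dict.keys, hitems] using hnd
  by_cases h1 : p.1 = "imdb_id"
  · simp [pvDropSet, pvCondSet, h1, h1 ▸ hv, Bool.beq_comm]
  · by_cases h2 : p.1 = "tmdb_id"
    · simp [pvDropSet, pvCondSet, h2, h2 ▸ hv, Bool.beq_comm]
    · by_cases h3 : p.1 = "tvdb_id"
      · simp [pvDropSet, pvCondSet, h3, h3 ▸ hv, Bool.beq_comm]
      · by_cases h4 : p.1 = "tvshowid"
        · simp [pvDropSet, pvCondSet, h4]
        · by_cases h5 : p.1 = "movieid"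
          · simp [pvDropSet, pvCondSet, h5]
          · by_cases h6 : p.1 = "tag"
            · simp [pvDropSet, pvCondSet, h6]
            · simp [pvDropSet, pvCondSet, h1, h2, h3, h4, h5, h6]

-- ===== VERDICT (by name: the statement is the Claim_ definition above) =====
theorem sanitizeTraktParams_spec : Claim_equal_sanitizeTraktParams := by
  intro data _ hpre
  unfold Spec_sanitizeTraktParams sanitizeTraktParams sanitizeTraktParams_alt
  apply List.map_congr_left
  intro item hitem
  exact pv_item_eq item (hpre item hitem)
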